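-- pv_equiv track=rewrite | github.com/FOX2011622/singer_tool | nomidi2ipa.py | phoneme2romaji
-- ===== SOURCE A (Python) =====
-- def phoneme2romaji(raw_phonemes):
--     phoneme_list = raw_phonemes.split(" ")
--     romaji_list = []
--     # 分词
--     text_flag = False
--     text = ""
--     for phoneme in phoneme_list:
--         if text_flag:
--             text += phoneme
--             romaji_list.append(text)
--             text = ""
--             text_flag = False
--         else:
--             if phoneme in ["AP", "SP", "N", "cl"]:
--                 romaji_list.append(phoneme)
--             elif phoneme not in ["a", "i", "u", "e", "o"]:
--                 text_flag = True
--                 text = phoneme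
--             else:
--                 romaji_list.append(phoneme)
--     return romaji_list
-- ===== SOURCE B (Python) =====
-- def phoneme2romaji(raw_phonemes):
--     phoneme_list = raw_phonemes.split(" ")
--     romaji_list = []
--     i = 0
--     n = len(phoneme_list)
--     while i < n:
--         p = phoneme_list[i]
--         if p in ("AP", "SP", "N", "cl") or p in ("a", "i", "u", "e", "o"):
--             romaji_list.append(p)
--             i += 1
--         elif i + 1 < n:
--             romaji_list.append(p + phoneme_list[i + 1])
--             i += 2
--         else:
--             break  # trailing consonant with no vowel to attach: dropped
--     return romaji_list
-- ===== Notes on version B (the rewrite author's own statement) =====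
-- stated objective: simpler
-- what changed: Replaced the carried text/text_flag state machine with an index-driven while loop that consumes a consonant and its following token in a single step (and stops on a trailing consonant).
import Mathlib
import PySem

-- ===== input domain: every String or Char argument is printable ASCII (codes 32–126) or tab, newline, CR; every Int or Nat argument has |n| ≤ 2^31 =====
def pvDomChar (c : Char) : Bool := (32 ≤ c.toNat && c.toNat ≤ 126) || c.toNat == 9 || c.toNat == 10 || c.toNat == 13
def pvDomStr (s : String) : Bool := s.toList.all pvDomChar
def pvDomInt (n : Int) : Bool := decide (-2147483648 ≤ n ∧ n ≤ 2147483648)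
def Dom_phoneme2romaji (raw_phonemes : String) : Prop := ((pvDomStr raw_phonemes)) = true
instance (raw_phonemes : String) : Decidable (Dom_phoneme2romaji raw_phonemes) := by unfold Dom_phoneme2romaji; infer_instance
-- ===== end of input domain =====

-- B replaces A's text/text_flag state machine by a loop consuming consonant+next pairs in one step (objective: simpler; return value only, no side effects involved).

-- ===== PORT A =====
-- the for-loop of A, carrying (romaji_list, text_flag, text) exactly as the Python does
def p2rLoop : List String → List String → Bool → String → List String
  | [], romaji_list, _, _ => romaji_list
  | phoneme :: rest, romaji_list, text_flag, text =>
    if text_flag then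
      p2rLoop rest (romaji_list ++ [text ++ phoneme]) false ""
    else
      if phoneme ∈ (["AP", "SP", "N", "cl"] : List String) then
        p2rLoop rest (romaji_list ++ [phoneme]) text_flag text
      else if ¬ (phoneme ∈ (["a", "i", "u", "e", "o"] : List String)) then
        p2rLoop rest romaji_list true phoneme
      else
        p2rLoop rest (romaji_list ++ [phoneme]) text_flag text

def phoneme2romaji (raw_phonemes : String) : List String :=
  p2rLoop ((PySem.Str.split? raw_phonemes " ").getD []) [] false ""

-- ===== PORT B =====
-- B's while loop over the token list with counter i, as recursion on the remaining tokens
def p2rAltGo : List String → List String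
  | [] => []
  | p :: rest =>
    if p ∈ (["AP", "SP", "N", "cl"] : List String) ∨ p ∈ (["a", "i", "u", "e", "o"] : List String) then
      p :: p2rAltGo rest
    else
      match rest with
      | [] => []      -- trailing consonant: dropped
      | q :: rest' => (p ++ q) :: p2rAltGo rest'

def phoneme2romaji_alt (raw_phonemes : String) : List String :=
  p2rAltGo ((PySem.Str.split? raw_phonemes " ").getD [])

-- ===== PRECONDITION & SPEC =====
def Spec_phoneme2romaji (raw_phonemes : String) (out : List String) : Prop := out = phoneme2romaji_alt raw_phonemes
instance (raw_phonemes : String) (out : List String) : Decidable (Spec_phoneme2romaji raw_phonemes out) := by unfold Spec_phoneme2romaji; infer_instance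

-- ===== CLAIM (what is proved, stated in full; the proofs are below) =====
def Claim_equal_phoneme2romaji : Prop := ∀ (raw_phonemes : String), Dom_phoneme2romaji raw_phonemes → Spec_phoneme2romaji raw_phonemes (phoneme2romaji raw_phonemes)

-- ===== LEMMAS AND PROOFS =====
theorem p2rAltGo_keep (p : String) (rest : List String)
    (h : p ∈ (["AP", "SP", "N", "cl"] : List String) ∨ p ∈ (["a", "i", "u", "e", "o"] : List String)) :
    p2rAltGo (p :: rest) = p :: p2rAltGo rest := by
  simp only [List.mem_cons, List.not_mem_nil, or_false] at h
  cases rest <;>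
    rcases h with (rfl | rfl | rfl | rfl) | (rfl | rfl | rfl | rfl | rfl) <;> simp [p2rAltGo]

theorem p2rLoop_eq_altGo (n : ℕ) :
    ∀ (l : List String), l.length ≤ n → ∀ (acc : List String) (t : String),
      p2rLoop l acc false t = acc ++ p2rAltGo l := by
  induction n with
  | zero =>
    intro l hl acc t
    match l with
    | [] => simp [p2rLoop, p2rAltGo]
    | _ :: _ => simp at hl
  | succ n ih =>
    intro l hl acc t
    match l with
    | [] => simp [p2rLoop, p2rAltGo]
    | p :: rest =>
      simp only [List.length_cons, Nat.add_le_add_iff_right] at hl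
      by_cases hs : p ∈ (["AP", "SP", "N", "cl"] : List String)
      · simp only [p2rLoop, hs, if_neg (Bool.false_ne_true), if_pos]
        rw [ih rest hl, p2rAltGo_keep p rest (Or.inl hs)]
        simp
      · by_cases hv : p ∈ (["a", "i", "u", "e", "o"] : List String)
        · simp only [p2rLoop, hs, hv, if_false, not_true,
            if_neg (Bool.false_ne_true)]
          rw [ih rest hl, p2rAltGo_keep p rest (Or.inr hv)]
          simp
        · -- consonant: A sets the flag; unfold one more step on rest
          match rest with
          | [] =>
            simp [p2rLoop, p2rAltGo, hs, hv]
          | q :: rest' =>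
            have hl' : rest'.length ≤ n := by
              simp only [List.length_cons] at hl; omega
            simp only [p2rLoop, p2rAltGo, hs, hv, if_false,
              if_neg (Bool.false_ne_true)]
            rw [ih rest' hl']
            simp

-- ===== VERDICT (by name: the statement is the Claim_ definition above) =====
theorem phoneme2romaji_spec : Claim_equal_phoneme2romaji := by
  intro raw _
  unfold Spec_phoneme2romaji phoneme2romaji phoneme2romaji_alt
  exact p2rLoop_eq_altGo _ _ (le_refl _) [] ""
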